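-- pv_equiv track=rewrite | github.com/da-in/algorithm-study | Programmers - 문제풀이/의상/jamin.py | solution
-- ===== SOURCE A (Python) =====
-- def solution(clothes):
--     answer = 1
--     clo = {}
--     val = []
--
--     for i in range(len(clothes)):
--         if clothes[i][1] not in clo:
--             clo[clothes[i][1]] = 1
--         else:
--             clo[clothes[i][1]] += 1
--
--     val = list(clo.values())
--
--     for j in val:
--         answer *= (j+1)
--
--     return answer-1
-- ===== SOURCE B (Python) =====
-- def solution(clothes):
--     cats = sorted(c for _, c in clothes)
--     total = 1
--     run = 0
--     prev = None
--     for c in cats: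
--         if c == prev:
--             run += 1
--         else:
--             total *= run + 1
--             prev = c
--             run = 1
--     return total * (run + 1) - 1
-- ===== Notes on version B (the rewrite author's own statement) =====
-- stated objective: alternative
-- what changed: Replaces the hash-count dict and separate product pass with a sort-then-scan: sort the categories, detect contiguous runs in one linear sweep, multiplying (run length + 1) as each run ends.
import Mathlib
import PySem

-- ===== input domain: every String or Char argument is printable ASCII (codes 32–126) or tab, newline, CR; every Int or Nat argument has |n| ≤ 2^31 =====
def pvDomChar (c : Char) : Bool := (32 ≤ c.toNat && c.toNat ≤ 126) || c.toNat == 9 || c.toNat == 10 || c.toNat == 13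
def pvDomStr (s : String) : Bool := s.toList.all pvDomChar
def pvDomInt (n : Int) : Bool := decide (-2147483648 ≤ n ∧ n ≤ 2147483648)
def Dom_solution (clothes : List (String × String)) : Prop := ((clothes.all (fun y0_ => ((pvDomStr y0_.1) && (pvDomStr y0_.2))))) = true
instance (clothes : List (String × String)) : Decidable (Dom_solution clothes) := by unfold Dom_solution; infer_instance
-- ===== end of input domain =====

-- B sorts the categories and scans contiguous runs instead of counting in a dict; return value only, no mutation.

-- ===== PORT A =====
def solution (clothes : List (String × String)) : Int :=
  let clo := (PySem.List.pyRange 0 (PySem.List.len clothes) 1).foldl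
    (fun clo i =>
      if clo.contains (PySem.List.pyGetD clothes i ("", "")).2 = false then
        clo.insert (PySem.List.pyGetD clothes i ("", "")).2 1
      else  -- clo[c] += 1: the key is present, so the getD default 0 is never used
        clo.insert (PySem.List.pyGetD clothes i ("", "")).2
          (clo.getD (PySem.List.pyGetD clothes i ("", "")).2 0 + 1))
    (PySem.Dict.empty : PySem.Dict String Int)
  let val := clo.values
  let answer := val.foldl (fun answer j => answer * (j + 1)) (1 : Int)
  answer - 1

-- ===== PORT B =====
-- loop body of B's single for-loop over the sorted categories; state = (total, run, prev)
def altStep (st : Int × Int × Option String) (c : String) : Int × Int × Option String :=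
  if some c == st.2.2 then (st.1, st.2.1 + 1, st.2.2)
  else (st.1 * (st.2.1 + 1), 1, some c)

def solution_alt (clothes : List (String × String)) : Int :=
  let cats := PySem.List.sorted (clothes.map (fun p => p.2)) (fun c => c) false
  let st := cats.foldl altStep (1, 0, none)
  st.1 * (st.2.1 + 1) - 1

-- ===== PRECONDITION & SPEC =====
def Spec_solution (clothes : List (String × String)) (out : Int) : Prop := out = solution_alt clothes
instance (clothes : List (String × String)) (out : Int) : Decidable (Spec_solution clothes out) := by unfold Spec_solution; infer_instance

-- ===== CLAIM (what is proved, stated in full; the proofs are below) =====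
def Claim_equal_solution : Prop := ∀ (clothes : List (String × String)), Dom_solution clothes → Spec_solution clothes (solution clothes)

-- ===== LEMMAS AND PROOFS =====

-- the common value both programs compute, plus one: product over the distinct categories of (count + 1)
def catProd (l : List String) : Int :=
  ((PySem.List.dedup l).map (fun k => (l.count k : Int) + 1)).prod

theorem catProd_perm {l l' : List String} (h : l.Perm l') : catProd l = catProd l' := by
  unfold catProd
  have hd : (PySem.List.dedup l).Perm (PySem.List.dedup l') := by
    rw [List.perm_ext_iff_of_nodup (PySem.List.nodup_dedup _) (PySem.List.nodup_dedup _)]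
    intro a
    simp only [PySem.List.mem_dedup]
    exact h.mem_iff
  have hf : (fun k => (l.count k : Int) + 1) = (fun k => (l'.count k : Int) + 1) := by
    funext k; rw [h.count_eq]
  rw [hf]
  exact (hd.map _).prod_eq

theorem foldl_mul_add_one (L : List Int) (a : Int) :
    L.foldl (fun ans j => ans * (j + 1)) a = a * (L.map (fun j => j + 1)).prod := by
  induction L generalizing a with
  | nil => simp
  | cons x L ih => simp [ih, mul_assoc]

theorem solution_eq_catProd (clothes : List (String × String)) :
    solution clothes = catProd (clothes.map (fun p => p.2)) - 1 := by
  show (((PySem.List.pyRange 0 (PySem.List.len clothes) 1).foldl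
      (fun clo i =>
        if PySem.Dict.contains clo (PySem.List.pyGetD clothes i ("", "")).2 = false then
          clo.insert (PySem.List.pyGetD clothes i ("", "")).2 1
        else
          clo.insert (PySem.List.pyGetD clothes i ("", "")).2
            (clo.getD (PySem.List.pyGetD clothes i ("", "")).2 0 + 1))
      (PySem.Dict.empty : PySem.Dict String Int)).values.foldl (fun answer j => answer * (j + 1)) 1) - 1 = _
  have hloop : ((PySem.List.pyRange 0 (PySem.List.len clothes) 1).foldl
      (fun clo i =>
        if PySem.Dict.contains clo (PySem.List.pyGetD clothes i ("", "")).2 = false then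
          clo.insert (PySem.List.pyGetD clothes i ("", "")).2 1
        else
          clo.insert (PySem.List.pyGetD clothes i ("", "")).2
            (clo.getD (PySem.List.pyGetD clothes i ("", "")).2 0 + 1))
      (PySem.Dict.empty : PySem.Dict String Int))
      = clothes.foldl (fun clo p => if clo.contains p.2 = false then clo.insert p.2 1
          else clo.insert p.2 (clo.getD p.2 0 + 1)) (PySem.Dict.empty : PySem.Dict String Int) :=
    PySem.List.foldl_pyRange_zero_pyGetD clothes ("", "")
      (fun (clo : PySem.Dict String Int) (p : String × String) =>
        if clo.contains p.2 = false then clo.insert p.2 1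
        else clo.insert p.2 (clo.getD p.2 0 + 1)) PySem.Dict.empty
  rw [hloop]
  have hstep : (fun (clo : PySem.Dict String Int) (p : String × String) =>
      if clo.contains p.2 = false then clo.insert p.2 1
      else clo.insert p.2 (clo.getD p.2 0 + 1))
      = (fun clo p => clo.insert p.2 (clo.getD p.2 0 + 1)) := by
    funext clo p
    by_cases h : clo.contains p.2
    · simp [h]
    · have hc : clo.contains p.2 = false := by simpa using h
      simp [hc, PySem.Dict.getD_of_not_contains clo 0 hc]
  rw [hstep]
  have hmap : ((clothes.map (fun p : String × String => p.2)).foldl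
      (fun (d : PySem.Dict String Int) c => d.insert c (d.getD c 0 + 1)) PySem.Dict.empty)
      = clothes.foldl (fun d p => d.insert p.2 (d.getD p.2 0 + 1)) PySem.Dict.empty :=
    by rw [List.foldl_map]
  rw [← hmap, PySem.Dict.foldl_insert_getD_add_one_eq_counter]
  rw [foldl_mul_add_one]
  unfold catProd
  simp [PySem.Dict.values, PySem.Dict.items_counter, List.map_map, Function.comp_def]

theorem foldl_run (t : List String) (d : String) (T R : Int)
    (ht : ∀ x ∈ t, x = d) :
    t.foldl altStep (T, R, some d) = (T, R + t.length, some d) := by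
  induction t generalizing R with
  | nil => simp
  | cons x t ih =>
    have hx : x = d := ht x (by simp)
    subst hx
    rw [List.foldl_cons]
    have h1 : altStep (T, R, some x) x = (T, R + 1, some x) := by simp [altStep]
    rw [h1, ih (R + 1) (fun y hy => ht y (by simp [hy]))]
    have h2 : R + 1 + (t.length : Int) = R + ((t.length : Nat) + 1 : Nat) := by push_cast; ring
    rw [h2]
    simp

theorem catProd_run (t u : List String) (d : String) (ht : ∀ x ∈ t, x = d)
    (htne : t ≠ []) (hdu : d ∉ u) :
    catProd (t ++ u) = ((t.length : Int) + 1) * catProd u := by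
  have hnodup2 : (d :: PySem.List.dedup u).Nodup := by
    refine List.nodup_cons.mpr ⟨fun h => hdu ((PySem.List.mem_dedup _ _).mp h), PySem.List.nodup_dedup _⟩
  have hperm : (PySem.List.dedup (t ++ u)).Perm (d :: PySem.List.dedup u) := by
    rw [List.perm_ext_iff_of_nodup (PySem.List.nodup_dedup _) hnodup2]
    intro a
    simp only [PySem.List.mem_dedup, List.mem_append, List.mem_cons]
    constructor
    · rintro (h | h)
      · exact Or.inl (ht a h)
      · exact Or.inr h
    · rintro (h | h)
      · subst h
        obtain ⟨x, hx⟩ := List.exists_mem_of_ne_nil t htne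
        exact Or.inl (ht x hx ▸ hx)
      · exact Or.inr h
  unfold catProd
  rw [(hperm.map _).prod_eq, List.map_cons, List.prod_cons]
  have hcd : ((t ++ u).count d : Int) = (t.length : Int) := by
    rw [List.count_append, List.count_eq_zero.mpr hdu,
      List.count_eq_length.mpr (fun b hb => (ht b hb).symm)]
    simp
  rw [hcd]
  congr 1
  refine congrArg List.prod (List.map_congr_left ?_)
  intro k hk
  have hku : k ∈ u := (PySem.List.mem_dedup _ _).mp hk
  have hkd : k ∉ t := fun h => hdu ((ht k h) ▸ hku)
  rw [List.count_append, List.count_eq_zero.mpr hkd]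
  simp

theorem scan_sorted : ∀ (n : Nat) (s : List String), s.length ≤ n → s.Pairwise (· ≤ ·) →
    ∀ (T R : Int) (prev : Option String), (∀ x ∈ s, prev ≠ some x) →
    (s.foldl altStep (T, R, prev)).1 * ((s.foldl altStep (T, R, prev)).2.1 + 1)
      = T * (R + 1) * catProd s := by
  intro n
  induction n with
  | zero =>
    intro s hs _ T R prev _
    have : s = [] := List.length_eq_zero_iff.mp (Nat.le_zero.mp hs)
    subst this
    simp [catProd, PySem.List.dedup]
  | succ n ih =>
    intro s hs hp T R prev hprev
    match s with
    | [] =>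
      simp [catProd, PySem.List.dedup]
    | d :: rest =>
      have h1 : altStep (T, R, prev) d = (T * (R + 1), 1, some d) := by
        have : (some d == prev) = false := by
          simp only [beq_eq_false_iff_ne, ne_eq]
          exact fun h => hprev d (by simp) h.symm
        simp [altStep, this]
      set t := rest.takeWhile (fun x => x == d) with htdef
      set u := rest.dropWhile (fun x => x == d) with hudef
      have hsplit : rest = t ++ u := by
        rw [htdef, hudef]; exact (List.takeWhile_append_dropWhile).symm
      have htall : ∀ x ∈ t, x = d := by
        intro x hx
        rw [htdef] at hx
        exact eq_of_beq (List.mem_takeWhile_imp (p := fun y => y == d) hx)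
      have hdrest : ∀ x ∈ rest, d ≤ x := fun x hx => (List.pairwise_cons.mp hp).1 x hx
      have hurest : u.Sublist rest := by rw [hudef]; exact List.dropWhile_sublist _
      have hupw : u.Pairwise (· ≤ ·) := ((List.pairwise_cons.mp hp).2).sublist hurest
      have hdu : d ∉ u := by
        intro hdmem
        cases hu : u with
        | nil => rw [hu] at hdmem; simp at hdmem
        | cons e u' =>
          have hed : (e == d) = false := by
            have h2 := List.head?_dropWhile_not (fun x => x == d) rest
            rw [← hudef, hu] at h2
            simpa using h2
          have hed' : e ≠ d := fun h => by simp [h] at hed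
          have hde : d ≤ e := hdrest e (hurest.subset (by simp [hu]))
          have hupw2 : (e :: u').Pairwise (· ≤ ·) := hu ▸ hupw
          have hee : e ≤ d := by
            rw [hu] at hdmem
            rcases List.mem_cons.mp hdmem with h | h
            · exact h.symm.le
            · exact (List.pairwise_cons.mp hupw2).1 d h
          exact hed' (le_antisymm hee hde)
      have hulen : u.length ≤ n := by
        have := hurest.length_le
        simp at hs
        omega
      rw [List.foldl_cons, h1, hsplit, List.foldl_append,
        foldl_run t d _ _ htall]
      have hih := ih u hulen hupw (T * (R + 1)) (1 + (t.length : Int)) (some d)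
        (fun x hx h => hdu ((Option.some.inj h) ▸ hx))
      rw [hih]
      have hrun : catProd (d :: (t ++ u)) = (((d :: t).length : Int) + 1) * catProd u := by
        have := catProd_run (d :: t) u d
          (fun x hx => by
            rcases List.mem_cons.mp hx with h | h
            · exact h
            · exact htall x h)
          (by simp) hdu
        simpa using this
      rw [hrun]
      simp only [List.length_cons]
      push_cast
      ring

theorem solution_alt_eq_catProd (clothes : List (String × String)) :
    solution_alt clothes = catProd (clothes.map (fun p => p.2)) - 1 := by
  unfold solution_alt
  have hpw : (PySem.List.sorted (clothes.map (fun p => p.2)) (fun c => c) false).Pairwise (· ≤ ·) := by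
    simpa using PySem.List.sorted_pairwise (xs := clothes.map (fun p => p.2)) (key := fun c => c)
  have h := scan_sorted (PySem.List.sorted (clothes.map (fun p => p.2)) (fun c => c) false).length
    _ le_rfl hpw 1 0 none (by simp)
  simp only [] at h ⊢
  rw [h, catProd_perm (PySem.List.sorted_perm (xs := clothes.map (fun p => p.2)) (key := fun c => c) (rev := false))]
  ring

-- ===== VERDICT (by name: the statement is the Claim_ definition above) =====
theorem solution_spec : Claim_equal_solution := by
  intro clothes _
  unfold Spec_solution
  rw [solution_eq_catProd, solution_alt_eq_catProd]
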